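-- pv_equiv track=rewrite | github.com/Ye-eun-Kim/AlgorithmStudy | 210503.py | solution
-- ===== SOURCE A (Python) =====
-- def solution(scoville, K):
--
--     cnt = 0
--     ##scoville 정렬
--     scoville.sort()
--     ##스코빌 지수가 K 미만인 요소의 최대 index 구하기 -> n == K 미만인 요소 개수
--     start = 0
--     end = len(scoville)-1
--     while start <= end :
--         mid = (start+end)//2
--         if scoville[mid] < K :
--             start = mid+1
--         elif scoville[mid] > K :
--             end = mid -1
--         elif scoville[mid] == K :
--             end=mid
--             break
--     n = end
--
--     ##n==1
--     while n!=0 :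
--         if n==1 :
--             return cnt+1
--         else :
--             temp = scoville.pop(0)+scoville.pop(0)*2
--             cnt+=1
--             scoville.append(temp)
--             scoville.sort()
--             if temp >= K :
--                 if n==2 :
--                     return cnt
--                 else :
--                     n-=2
--             elif temp < K :
--                 if n==2 :
--                     return cnt+1
--                 else :
--                     n-=1
--     return cnt
-- ===== SOURCE B (Python) =====
-- def solution(scoville, K):
--     # Leftist min-heap instead of A's re-sort-per-merge; works on a sorted copy
--     # (A sorts its argument in place: only the return value is equivalent).
--     s = sorted(scoville)
--     # same n-tracking binary search as the original
--     start, end = 0, len(s) - 1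
--     while start <= end:
--         mid = (start + end) // 2
--         if s[mid] < K:
--             start = mid + 1
--         elif s[mid] > K:
--             end = mid - 1
--         else:
--             end = mid
--             break
--     n = end
--
--     # leftist heap node: None or (rank, value, left, right)
--     def merge(a, b):
--         if a is None:
--             return b
--         if b is None:
--             return a
--         if b[1] < a[1]:
--             a, b = b, a
--         r = merge(a[3], b)
--         l = a[2]
--         rl = l[0] if l else 0
--         rr = r[0] if r else 0
--         if rl >= rr:
--             return (rr + 1, a[1], l, r)
--         return (rl + 1, a[1], r, l)
--
--     heap = None
--     for x in s:
--         heap = merge(heap, (1, x, None, None))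
--
--     cnt = 0
--     while n != 0:
--         if n == 1:
--             return cnt + 1
--         a = heap[1]
--         heap = merge(heap[2], heap[3])
--         b = heap[1]
--         heap = merge(heap[2], heap[3])
--         temp = a + 2 * b
--         cnt += 1
--         heap = merge(heap, (1, temp, None, None))
--         if temp >= K:
--             if n == 2:
--                 return cnt
--             n -= 2
--         else:
--             if n == 2:
--                 return cnt + 1
--             n -= 1
--     return cnt
-- ===== Notes on version B (the rewrite author's own statement) =====
-- stated objective: faster
-- what changed: B replaces A's pop(0)/append/full-re-sort of the list on every merge by a hand-written leftist min-heap (merge-based persistent heap): pop the two minima and push the combined value in O(log n) each, keeping A's n-tracking binary search and branch logic; A also sorts its argument in place, B works on a copy, so only the return value is equivalent.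
import Mathlib
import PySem

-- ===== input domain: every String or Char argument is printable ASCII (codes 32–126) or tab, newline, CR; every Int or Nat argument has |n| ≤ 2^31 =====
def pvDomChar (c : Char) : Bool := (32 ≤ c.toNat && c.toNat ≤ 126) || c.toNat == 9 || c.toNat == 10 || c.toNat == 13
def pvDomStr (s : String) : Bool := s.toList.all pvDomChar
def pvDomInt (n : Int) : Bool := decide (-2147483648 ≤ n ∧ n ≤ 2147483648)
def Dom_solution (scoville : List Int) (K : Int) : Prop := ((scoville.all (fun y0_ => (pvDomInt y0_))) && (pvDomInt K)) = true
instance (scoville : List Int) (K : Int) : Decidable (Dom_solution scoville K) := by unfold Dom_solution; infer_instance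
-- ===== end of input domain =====

-- B replaces A's pop(0)/append/full-re-sort per merge by a hand-written leftist min-heap
-- (pop the two minima, push the combined value), keeping A's n-tracking binary search; A sorts
-- its argument in place, B works on a copy, so the equivalence is about the return value only.

-- shared helper: both Pythons compute n with this identical binary search
-- (fuel = len+1 bounds the while loop; the interval shrinks each iteration, so it is never exhausted)
def pvSearchGo (s : List Int) (K : Int) : Nat → Int → Int → Int
  | 0, _, e => e
  | f+1, st, e =>
    if st ≤ e then
      let mid := PySem.Int.floordiv (st + e) 2
      match PySem.List.pyGet? s mid with
      | none => e          -- IndexError (unreachable: 0 ≤ st ≤ mid ≤ e < len whenever probed)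
      | some v =>
        if v < K then pvSearchGo s K f (mid+1) e
        else if v > K then pvSearchGo s K f st (mid-1)
        else mid           -- end = mid; break
    else e

def pvSearchN (s : List Int) (K : Int) : Int :=
  pvSearchGo s K (s.length + 1) 0 ((s.length : Int) - 1)

-- ===== PORT A =====
-- the while n != 0 loop; each iteration shortens the list by one, so fuel = len suffices
def pvLoopA (K : Int) : Nat → List Int → Int → Int → Int
  | 0, _, _, cnt => cnt
  | f+1, sc, n, cnt =>
    if n = 0 then cnt
    else if n = 1 then cnt + 1
    else
      match PySem.List.pop? sc 0 with
      | none => cnt        -- IndexError (outside Pre_)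
      | some (a, sc1) =>
        match PySem.List.pop? sc1 0 with
        | none => cnt      -- IndexError (outside Pre_)
        | some (b, sc2) =>
          let temp := a + b * 2
          let cnt1 := cnt + 1
          let sc3 := PySem.List.sorted (sc2 ++ [temp]) (fun x => x) false
          if temp ≥ K then
            if n = 2 then cnt1 else pvLoopA K f sc3 (n-2) cnt1
          else
            if n = 2 then cnt1 + 1 else pvLoopA K f sc3 (n-1) cnt1

def solution (scoville : List Int) (K : Int) : Int :=
  let sc := PySem.List.sorted scoville (fun x => x) false
  pvLoopA K sc.length sc (pvSearchN sc K) 0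

-- ===== PORT B =====
-- Source B's leftist-heap node: None -> nil, (rank, value, left, right) -> node rank value left right
inductive pvLH : Type where
  | nil : pvLH
  | node : Int → Int → pvLH → pvLH → pvLH
deriving DecidableEq, Repr

def pvLH.size : pvLH → Nat
  | .nil => 0
  | .node _ _ l r => l.size + r.size + 1

-- Source B's `l[0] if l else 0`
def pvRank : pvLH → Int
  | .nil => 0
  | .node rk _ _ _ => rk

-- Source B's merge: swap so the smaller root stays, merge into its right spine, restore the leftist shape
def pvMerge : pvLH → pvLH → pvLH
  | .nil, b => b
  | .node rka va la ra, .nil => .node rka va la ra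
  | .node rka va la ra, .node rkb vb lb rb =>
    if vb < va then
      let r := pvMerge rb (.node rka va la ra)
      if pvRank lb ≥ pvRank r then .node (pvRank r + 1) vb lb r
      else .node (pvRank lb + 1) vb r lb
    else
      let r := pvMerge ra (.node rkb vb lb rb)
      if pvRank la ≥ pvRank r then .node (pvRank r + 1) va la r
      else .node (pvRank la + 1) va r la
termination_by a b => a.size + b.size
decreasing_by all_goals (simp [pvLH.size]; try omega)

-- Source B's build loop: for x in s: heap = merge(heap, (1, x, None, None))
def pvHeapify (s : List Int) : pvLH :=
  s.foldl (fun h x => pvMerge h (.node 1 x .nil .nil)) .nil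

-- Source B's while loop on the heap (same fuel as A's loop: one merge per iteration)
def pvLoopB (K : Int) : Nat → pvLH → Int → Int → Int
  | 0, _, _, cnt => cnt
  | f+1, h, n, cnt =>
    if n = 0 then cnt
    else if n = 1 then cnt + 1
    else
      match h with
      | .nil => cnt                          -- heap[1] on None: TypeError (outside Pre_)
      | .node _ a l1 r1 =>
        match pvMerge l1 r1 with
        | .nil => cnt                        -- heap[1] on None: TypeError (outside Pre_)
        | .node _ b l2 r2 =>
          let h2 := pvMerge l2 r2
          let temp := a + 2 * b
          let cnt1 := cnt + 1
          let h3 := pvMerge h2 (.node 1 temp .nil .nil)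
          if temp ≥ K then
            if n = 2 then cnt1 else pvLoopB K f h3 (n-2) cnt1
          else
            if n = 2 then cnt1 + 1 else pvLoopB K f h3 (n-1) cnt1

def solution_alt (scoville : List Int) (K : Int) : Int :=
  let s := PySem.List.sorted scoville (fun x => x) false
  pvLoopB K s.length (pvHeapify s) (pvSearchN s K) 0

-- ===== PRECONDITION & SPEC =====
-- Pre_ excludes exactly the inputs on which the Python A raises IndexError: when every
-- element exceeds K (including the empty list) the binary search leaves n = -1 and the
-- loop pops until the list is exhausted (B raises TypeError on the same inputs).
def Pre_solution (scoville : List Int) (K : Int) : Prop := ∃ x ∈ scoville, x ≤ K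
instance (scoville : List Int) (K : Int) : Decidable (Pre_solution scoville K) := by unfold Pre_solution; infer_instance

def pvWitness_solution : List Int × Int := ([1, 2, 3, 9, 10, 12], 7)

def Spec_solution (scoville : List Int) (K : Int) (out : Int) : Prop := out = solution_alt scoville K
instance (scoville : List Int) (K : Int) (out : Int) : Decidable (Spec_solution scoville K out) := by unfold Spec_solution; infer_instance

-- ===== CLAIM (what is proved, stated in full; the proofs are below) =====
def Claim_equal_solution : Prop := ∀ (scoville : List Int) (K : Int), Dom_solution scoville K → Pre_solution scoville K → Spec_solution scoville K (solution scoville K)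

-- ===== LEMMAS AND PROOFS =====

-- the multiset of values stored in a heap
def pvElems : pvLH → List Int
  | .nil => []
  | .node _ v l r => v :: (pvElems l ++ pvElems r)

-- heap order: each root bounds its subtrees from below
def pvHeapOrd : pvLH → Prop
  | .nil => True
  | .node _ v l r => (∀ y ∈ pvElems l, v ≤ y) ∧ (∀ y ∈ pvElems r, v ≤ y) ∧ pvHeapOrd l ∧ pvHeapOrd r

lemma pvElems_eq_nil {h : pvLH} (he : pvElems h = []) : h = pvLH.nil := by
  cases h with
  | nil => rfl
  | node rk v l r => simp [pvElems] at he

-- merge preserves the multiset of values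
lemma pvMerge_perm : ∀ (a b : pvLH), (pvElems (pvMerge a b)).Perm (pvElems a ++ pvElems b) := by
  intro a b
  induction a, b using pvMerge.induct with
  | case1 b => simp [pvMerge, pvElems]
  | case2 rka va la ra => simp [pvMerge, pvElems]
  | case3 rka va la ra rkb vb lb rb hlt r hrk ih =>
    rw [List.perm_iff_count]; intro x
    have hc := ih.count_eq x
    simp only [pvMerge, if_pos hlt]
    split <;> simp only [pvElems, List.count_append, List.count_cons] at hc ⊢ <;> omega
  | case4 rka va la ra rkb vb lb rb hlt r hrk ih =>
    rw [List.perm_iff_count]; intro x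
    have hc := ih.count_eq x
    simp only [pvMerge, if_pos hlt]
    split <;> simp only [pvElems, List.count_append, List.count_cons] at hc ⊢ <;> omega
  | case5 rka va la ra rkb vb lb rb hlt r hrk ih =>
    rw [List.perm_iff_count]; intro x
    have hc := ih.count_eq x
    simp only [pvMerge, if_neg hlt]
    split <;> simp only [pvElems, List.count_append, List.count_cons] at hc ⊢ <;> omega
  | case6 rka va la ra rkb vb lb rb hlt r hrk ih =>
    rw [List.perm_iff_count]; intro x
    have hc := ih.count_eq x
    simp only [pvMerge, if_neg hlt]
    split <;> simp only [pvElems, List.count_append, List.count_cons] at hc ⊢ <;> omega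

-- the bound needed for heap order of a merge: the kept root bounds everything merged in
lemma pvMerge_bound_b {rka va : Int} {la ra : pvLH} {rkb vb : Int} {lb rb : pvLH}
    (ha : pvHeapOrd (.node rka va la ra)) (hb : pvHeapOrd (.node rkb vb lb rb))
    (hlt : vb < va) : ∀ y ∈ pvElems (pvMerge rb (.node rka va la ra)), vb ≤ y := by
  intro y hy
  have := (pvMerge_perm rb (.node rka va la ra)).mem_iff.mp hy
  obtain ⟨hal, har, _, _⟩ := ha
  obtain ⟨hbl, hbr, _, _⟩ := hb
  rcases List.mem_append.mp this with h1 | h2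
  · exact hbr y h1
  · rcases List.mem_cons.mp h2 with rfl | h3
    · exact le_of_lt hlt
    · rcases List.mem_append.mp h3 with h4 | h4
      · exact le_of_lt (lt_of_lt_of_le hlt (hal y h4))
      · exact le_of_lt (lt_of_lt_of_le hlt (har y h4))

lemma pvMerge_bound_a {rka va : Int} {la ra : pvLH} {rkb vb : Int} {lb rb : pvLH}
    (ha : pvHeapOrd (.node rka va la ra)) (hb : pvHeapOrd (.node rkb vb lb rb))
    (hle : va ≤ vb) : ∀ y ∈ pvElems (pvMerge ra (.node rkb vb lb rb)), va ≤ y := by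
  intro y hy
  have := (pvMerge_perm ra (.node rkb vb lb rb)).mem_iff.mp hy
  obtain ⟨hal, har, _, _⟩ := ha
  obtain ⟨hbl, hbr, _, _⟩ := hb
  rcases List.mem_append.mp this with h1 | h2
  · exact har y h1
  · rcases List.mem_cons.mp h2 with rfl | h3
    · exact hle
    · rcases List.mem_append.mp h3 with h4 | h4
      · exact le_trans hle (hbl y h4)
      · exact le_trans hle (hbr y h4)

-- merge preserves heap order
lemma pvMerge_heapOrd : ∀ (a b : pvLH), pvHeapOrd a → pvHeapOrd b → pvHeapOrd (pvMerge a b) := by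
  intro a b
  induction a, b using pvMerge.induct with
  | case1 b => intro _ hb; simpa [pvMerge]
  | case2 rka va la ra => intro ha _; simpa [pvMerge]
  | case3 rka va la ra rkb vb lb rb hlt r hrk ih =>
    intro ha hb
    have hmem := pvMerge_bound_b ha hb hlt
    have hord := ih hb.2.2.2 ha
    simp only [pvMerge, if_pos hlt]
    split <;> exact ⟨by first | exact hb.1 | exact hmem, by first | exact hb.1 | exact hmem,
      by first | exact hb.2.2.1 | exact hord, by first | exact hb.2.2.1 | exact hord⟩
  | case4 rka va la ra rkb vb lb rb hlt r hrk ih =>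
    intro ha hb
    have hmem := pvMerge_bound_b ha hb hlt
    have hord := ih hb.2.2.2 ha
    simp only [pvMerge, if_pos hlt]
    split <;> exact ⟨by first | exact hb.1 | exact hmem, by first | exact hb.1 | exact hmem,
      by first | exact hb.2.2.1 | exact hord, by first | exact hb.2.2.1 | exact hord⟩
  | case5 rka va la ra rkb vb lb rb hlt r hrk ih =>
    intro ha hb
    have hmem := pvMerge_bound_a ha hb (by omega)
    have hord := ih ha.2.2.2 hb
    simp only [pvMerge, if_neg hlt]
    split <;> exact ⟨by first | exact ha.1 | exact hmem, by first | exact ha.1 | exact hmem,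
      by first | exact ha.2.2.1 | exact hord, by first | exact ha.2.2.1 | exact hord⟩
  | case6 rka va la ra rkb vb lb rb hlt r hrk ih =>
    intro ha hb
    have hmem := pvMerge_bound_a ha hb (by omega)
    have hord := ih ha.2.2.2 hb
    simp only [pvMerge, if_neg hlt]
    split <;> exact ⟨by first | exact ha.1 | exact hmem, by first | exact ha.1 | exact hmem,
      by first | exact ha.2.2.1 | exact hord, by first | exact ha.2.2.1 | exact hord⟩

-- the root of an ordered heap bounds every stored value
lemma pvRoot_min {rk v : Int} {l r : pvLH} (h : pvHeapOrd (.node rk v l r)) :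
    ∀ y ∈ pvElems (.node rk v l r), v ≤ y := by
  obtain ⟨hl, hr, _, _⟩ := h
  intro y hy
  rcases List.mem_cons.mp hy with rfl | h2
  · exact le_refl _
  · rcases List.mem_append.mp h2 with h3 | h3
    · exact hl y h3
    · exact hr y h3

-- on a sorted list the root of a permuting ordered heap is the head
lemma pvRoot_eq_head {rk v a : Int} {l r : pvLH} {t : List Int}
    (hord : pvHeapOrd (.node rk v l r))
    (hperm : (pvElems (.node rk v l r)).Perm (a :: t))
    (hpair : (a :: t).Pairwise (· ≤ ·)) : v = a := by
  have hva : v ≤ a := pvRoot_min hord a (hperm.mem_iff.mpr (List.mem_cons_self))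
  have hvmem : v ∈ a :: t := hperm.mem_iff.mp (by simp [pvElems])
  have hav : a ≤ v := by
    rcases List.mem_cons.mp hvmem with rfl | h2
    · exact le_refl _
    · exact (List.pairwise_cons.mp hpair).1 v h2
  omega

lemma pvSingleton_ord (x : Int) : pvHeapOrd (pvLH.node 1 x .nil .nil) := by
  refine ⟨?_, ?_, trivial, trivial⟩ <;> intro y hy <;> simp [pvElems] at hy

-- heapify builds an ordered heap holding exactly the list's values
lemma pvHeapify_spec : ∀ (s : List Int) (h : pvLH), pvHeapOrd h →
    pvHeapOrd (s.foldl (fun h x => pvMerge h (.node 1 x .nil .nil)) h) ∧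
    (pvElems (s.foldl (fun h x => pvMerge h (.node 1 x .nil .nil)) h)).Perm (pvElems h ++ s) := by
  intro s
  induction s with
  | nil => intro h hh; exact ⟨hh, by simp⟩
  | cons x s ih =>
    intro h hh
    obtain ⟨ho, hp⟩ := ih (pvMerge h (.node 1 x .nil .nil)) (pvMerge_heapOrd _ _ hh (pvSingleton_ord x))
    refine ⟨by simpa using ho, ?_⟩
    simp only [List.foldl_cons]
    refine hp.trans ?_
    rw [List.perm_iff_count]; intro y
    have hc := (pvMerge_perm h (.node 1 x .nil .nil)).count_eq y
    simp only [pvElems, List.count_append, List.count_cons, List.count_nil] at hc ⊢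
    omega

lemma pvPopNil : PySem.List.pop? ([] : List Int) 0 = none := by decide

-- the two loops coincide: A's sorted list and B's ordered heap hold the same values
lemma pvLoop_eq (K : Int) : ∀ (f : Nat) (sc : List Int) (h : pvLH) (n cnt : Int),
    sc.Pairwise (· ≤ ·) → pvHeapOrd h → (pvElems h).Perm sc →
    pvLoopA K f sc n cnt = pvLoopB K f h n cnt := by
  intro f
  induction f with
  | zero => intro sc h n cnt _ _ _; rfl
  | succ f ih =>
    intro sc h n cnt hpair hord hperm
    by_cases hn0 : n = 0
    · simp [pvLoopA, pvLoopB, hn0]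
    by_cases hn1 : n = 1
    · simp [pvLoopA, pvLoopB, hn1]
    match sc, hpair, hperm with
    | [], _, hperm =>
      have : h = .nil := pvElems_eq_nil (List.perm_nil.mp hperm)
      subst this
      simp [pvLoopA, pvLoopB, hn0, hn1, PySem.List.pop?]
    | [a], hpair, hperm =>
      match h, hperm with
      | .nil, hperm => exact absurd hperm.length_eq (by simp [pvElems])
      | .node rk v l r, hperm =>
        have hlen := hperm.length_eq
        simp only [pvElems, List.length_cons, List.length_append, List.length_nil] at hlen
        have hlnil := pvElems_eq_nil (List.length_eq_zero_iff.mp (by omega : (pvElems l).length = 0))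
        have hrnil := pvElems_eq_nil (List.length_eq_zero_iff.mp (by omega : (pvElems r).length = 0))
        subst hlnil hrnil
        simp [pvLoopA, pvLoopB, hn0, hn1, PySem.List.pop?_zero_cons, pvPopNil, pvMerge]
    | a :: b :: rest, hpair, hperm =>
      match h, hperm with
      | .nil, hperm => exact absurd hperm.length_eq (by simp [pvElems])
      | .node rk v l1 r1, hperm =>
        -- first pop: the root is the head a
        have hva : v = a := pvRoot_eq_head hord hperm hpair
        subst hva
        have hperm1 : (pvElems (pvMerge l1 r1)).Perm (b :: rest) := by
          have h1 := (pvMerge_perm l1 r1).cons v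
          have h2 : (v :: (pvElems l1 ++ pvElems r1)).Perm (v :: b :: rest) := by
            simpa [pvElems] using hperm
          exact (h1.trans h2).cons_inv
        have hord1 : pvHeapOrd (pvMerge l1 r1) := pvMerge_heapOrd _ _ hord.2.2.1 hord.2.2.2
        have hpairt : (b :: rest).Pairwise (· ≤ ·) := (List.pairwise_cons.mp hpair).2
        match hm : pvMerge l1 r1, hperm1, hord1 with
        | .nil, hperm1, _ => exact absurd hperm1.length_eq (by simp [pvElems])
        | .node rk2 w l2 r2, hperm1, hord1 =>
          -- second pop: the new root is b
          have hwb : w = b := pvRoot_eq_head hord1 hperm1 hpairt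
          subst hwb
          have hperm2 : (pvElems (pvMerge l2 r2)).Perm rest := by
            have h1 := (pvMerge_perm l2 r2).cons w
            have h2 : (w :: (pvElems l2 ++ pvElems r2)).Perm (w :: rest) := by
              simpa [pvElems] using hperm1
            exact (h1.trans h2).cons_inv
          have hord2 : pvHeapOrd (pvMerge l2 r2) := pvMerge_heapOrd _ _ hord1.2.2.1 hord1.2.2.2
          -- push temp: elems h3 ~ A's re-sorted list
          have htemp : v + w * 2 = v + 2 * w := by ring
          have hord3 : pvHeapOrd (pvMerge (pvMerge l2 r2) (.node 1 (v + 2 * w) .nil .nil)) :=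
            pvMerge_heapOrd _ _ hord2 (pvSingleton_ord _)
          have hperm3 : (pvElems (pvMerge (pvMerge l2 r2) (.node 1 (v + 2 * w) .nil .nil))).Perm
              (PySem.List.sorted (rest ++ [v + 2 * w]) (fun x => x) false) := by
            refine ((pvMerge_perm _ _).trans ?_).trans
              (PySem.List.sorted_perm (xs := rest ++ [v + 2 * w]) (key := fun x => x) (rev := false)).symm
            exact ((hperm2.append_right _).trans (by simp [pvElems]))
          have hpair3 : (PySem.List.sorted (rest ++ [v + 2 * w]) (fun x => x) false).Pairwise (· ≤ ·) := by
            simpa using PySem.List.sorted_pairwise (xs := rest ++ [v + 2 * w]) (key := fun x => x)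
          simp only [pvLoopA, pvLoopB, hn0, hn1, if_false, PySem.List.pop?_zero_cons, hm, htemp]
          split_ifs <;> first | rfl | exact ih _ _ _ _ hpair3 hord3 hperm3

-- ===== VERDICT (by name: the statement is the Claim_ definition above) =====
theorem solution_spec : Claim_equal_solution := by
  intro scoville K _ _
  unfold Spec_solution solution solution_alt
  have hpair : (PySem.List.sorted scoville (fun x => x) false).Pairwise (· ≤ ·) := by
    simpa using PySem.List.sorted_pairwise (xs := scoville) (key := fun x => x)
  obtain ⟨ho, hp⟩ := pvHeapify_spec (PySem.List.sorted scoville (fun x => x) false) .nil trivial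
  exact pvLoop_eq K _ _ _ _ _ hpair ho (by simpa [pvElems] using hp)
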